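-- pv_equiv track=rewrite | github.com/adachel/Python_Start | Tasks/Difficulty_11_20/Task_514/Task_514.py | Calc
-- ===== SOURCE A (Python) =====
-- def Calc(n):
--     a = 0
--     arr = []
--     for i in range(0, n):
--         for j in range(0, i + 1):
--             a = i
--             arr.append(a)
--     res = arr[n]
--     return res
-- ===== SOURCE B (Python) =====
-- def Calc(n):
--     # m = index of the triangular block containing position n; t = first index after block m
--     m = 0
--     t = 1
--     while t <= n:
--         m += 1
--         t += m + 1
--     return m
-- ===== Notes on version B (the rewrite author's own statement) =====
-- stated objective: faster
-- what changed: Replaces building the whole triangular-repeat list (quadratic nested loops) and indexing it by a single incremental loop over triangular-number boundaries that finds the block containing index n.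
-- outside the precondition, e.g. on Calc(1): A raises IndexError, B returns 1
import Mathlib
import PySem

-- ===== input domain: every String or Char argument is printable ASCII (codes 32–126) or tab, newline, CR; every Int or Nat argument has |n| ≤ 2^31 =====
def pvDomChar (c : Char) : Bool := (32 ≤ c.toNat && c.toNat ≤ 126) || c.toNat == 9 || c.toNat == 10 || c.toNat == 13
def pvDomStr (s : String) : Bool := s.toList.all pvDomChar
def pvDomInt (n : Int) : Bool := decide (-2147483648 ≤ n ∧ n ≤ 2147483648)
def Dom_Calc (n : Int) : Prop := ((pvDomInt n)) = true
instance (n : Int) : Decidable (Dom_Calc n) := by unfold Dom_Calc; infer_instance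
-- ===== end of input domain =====

-- B replaces the quadratic list-building of A by an O(√n) walk over triangular-number
-- block boundaries (equivalence proved on n ≥ 2, where A's arr[n] does not raise).

-- ===== PORT A =====
-- literal transliteration: state is (a, arr); the nested for-loops append a := i,
-- i+1 times, for each i in range(0, n); then res = arr[n]
def Calc (n : Int) : Int :=
  ((PySem.List.pyGet?
      ((PySem.List.pyRange 0 n 1).foldl
        (fun (s : Int × Array Int) i =>
          (PySem.List.pyRange 0 (i + 1) 1).foldl (fun s _ => (i, s.2.push i)) s)
        ((0 : Int), (#[] : Array Int))).2.toList n).getD 0)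

-- ===== PORT B =====
-- the while-loop of Source B: m counts blocks, t is the first index after block m;
-- gas is fuel making the loop total (t grows by ≥ 2 per step, so n steps always suffice)
def calcLoopGo (n : Int) : Nat → Nat → Int → Int
  | 0, m, _t => (m : Int)
  | gas + 1, m, t => if t ≤ n then calcLoopGo n gas (m + 1) (t + (m + 1) + 1) else (m : Int)

def Calc_alt (n : Int) : Int := calcLoopGo n n.toNat 0 1

-- ===== PRECONDITION & SPEC =====
-- Pre_ excludes exactly n ≤ 1, where arr[n] is out of range and A raises IndexError
def Pre_Calc (n : Int) : Prop := 2 ≤ n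
instance (n : Int) : Decidable (Pre_Calc n) := by unfold Pre_Calc; infer_instance
def pvWitness_Calc : Int := (5)

def Spec_Calc (n : Int) (out : Int) : Prop := out = Calc_alt n
instance (n : Int) (out : Int) : Decidable (Spec_Calc n out) := by unfold Spec_Calc; infer_instance

-- ===== CLAIM (what is proved, stated in full; the proofs are below) =====
def Claim_equal_Calc : Prop := ∀ (n : Int), Dom_Calc n → Pre_Calc n → Spec_Calc n (Calc n)

-- ===== LEMMAS AND PROOFS =====

-- triangular numbers, recursively
def tri : Nat → Nat
  | 0 => 0
  | k + 1 => tri k + (k + 1)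

-- the list A builds, row by row
def seqL : Nat → List Int
  | 0 => []
  | k + 1 => seqL k ++ List.replicate (k + 1) (k : Int)

theorem tri_strictMono : StrictMono tri := by
  apply strictMono_nat_of_lt_succ
  intro k; simp [tri]

theorem tri_mono {a b : Nat} (h : a ≤ b) : tri a ≤ tri b :=
  tri_strictMono.monotone h

theorem inner_fold (i : Int) : ∀ (xs : List Int) (s : Int × Array Int),
    (xs.foldl (fun s _ => (i, s.2.push i)) s).2.toList
      = s.2.toList ++ List.replicate xs.length i := by
  intro xs
  induction xs with
  | nil => intro s; simp
  | cons x xs ih =>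
    intro s
    simp only [List.foldl_cons, ih]
    simp [List.replicate_succ]

theorem outer_fold : ∀ (k : Nat) (s : Int × Array Int),
    ((PySem.List.pyRange 0 (k : Int) 1).foldl
      (fun (s : Int × Array Int) i =>
        (PySem.List.pyRange 0 (i + 1) 1).foldl (fun s _ => (i, s.2.push i)) s) s).2.toList
      = s.2.toList ++ seqL k := by
  intro k
  induction k with
  | zero => intro s; simp [seqL]
  | succ k ih =>
    intro s
    have hsplit : PySem.List.pyRange 0 ((k : Int) + 1) 1
        = PySem.List.pyRange 0 (k : Int) 1 ++ [(k : Int)] :=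
      PySem.List.pyRange_one_succ_right (by positivity)
    push_cast
    rw [hsplit, List.foldl_append]
    simp only [List.foldl_cons, List.foldl_nil]
    rw [inner_fold]
    have hlen : (PySem.List.pyRange 0 ((k : Int) + 1) 1).length = k + 1 := by
      rw [PySem.List.length_pyRange_one]; omega
    rw [hlen, ih]
    simp [seqL]

theorem length_seqL (k : Nat) : (seqL k).length = tri k := by
  induction k with
  | zero => simp [seqL, tri]
  | succ k ih => simp [seqL, tri, ih]

theorem getD_seqL : ∀ (k m j : Nat), tri m ≤ j → j < tri (m + 1) → j < tri k →
    (seqL k).getD j 0 = (m : Int) := by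
  intro k
  induction k with
  | zero => intro m j _ _ h; simp [tri] at h
  | succ k ih =>
    intro m j h1 h2 h3
    rw [seqL, List.getD_eq_getElem?_getD]
    by_cases hj : j < tri k
    · rw [List.getElem?_append_left (by rw [length_seqL]; exact hj)]
      rw [← List.getD_eq_getElem?_getD]
      exact ih m j h1 h2 hj
    · -- j is in the last block, so m = k
      have hmk : m = k := by
        rcases Nat.lt_trichotomy m k with h | h | h
        · have := tri_mono (show m + 1 ≤ k from h); omega
        · exact h
        · have h4 := tri_mono (show k + 1 ≤ m from h)
          have hk1 : tri (k + 1) = tri k + (k + 1) := rfl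
          omega
      subst hmk
      have hlt : j - tri m < m + 1 := by
        have hk1 : tri (m + 1) = tri m + (m + 1) := rfl
        omega
      rw [List.getElem?_append_right (by rw [length_seqL]; omega)]
      rw [length_seqL, List.getElem?_replicate]
      simp [hlt]

theorem tri_cast_succ (m : Nat) : ((tri (m + 1) : Nat) : Int) = (tri m : Int) + m + 1 := by
  simp [tri]; ring

theorem loop_spec (n : Int) : ∀ (d gas m : Nat),
    ((tri (m + d) : Nat) : Int) ≤ n → n < ((tri (m + d + 1) : Nat) : Int) →
    (n + 1 - ((tri (m + 1) : Nat) : Int)).toNat ≤ gas →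
    calcLoopGo n gas m ((tri (m + 1) : Nat) : Int) = ((m + d : Nat) : Int) := by
  intro d
  induction d with
  | zero =>
    intro gas m h1 h2 hgas
    cases gas with
    | zero => simp [calcLoopGo]
    | succ g =>
      rw [calcLoopGo, if_neg (by simpa using not_le.mpr h2)]
      simp
  | succ d ih =>
    intro gas m h1 h2 hgas
    have hle : ((tri (m + 1) : Nat) : Int) ≤ n := by
      have := tri_mono (show m + 1 ≤ m + (d + 1) by omega)
      exact le_trans (by exact_mod_cast this) h1
    cases gas with
    | zero => omega
    | succ g =>
      rw [calcLoopGo, if_pos hle]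
      have harg : ((tri (m + 1) : Nat) : Int) + (↑m + 1) + 1 = ((tri (m + 1 + 1) : Nat) : Int) := by
        rw [tri_cast_succ (m + 1)]; push_cast; ring
      rw [harg]
      have hgas' : (n + 1 - ((tri (m + 1 + 1) : Nat) : Int)).toNat ≤ g := by
        have e := tri_cast_succ (m + 1)
        omega
      have := ih g (m + 1) (by convert h1 using 3; omega) (by convert h2 using 3; omega) hgas'
      rw [this]; congr 1; omega

theorem exists_block : ∀ (j : Nat), ∃ m, tri m ≤ j ∧ j < tri (m + 1) := by
  intro j
  induction j with
  | zero => exact ⟨0, by simp [tri]⟩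
  | succ j ih =>
    obtain ⟨m, h1, h2⟩ := ih
    by_cases h : j + 1 < tri (m + 1)
    · exact ⟨m, by omega, h⟩
    · have e1 : tri (m + 1) = tri m + (m + 1) := rfl
      have e2 : tri (m + 1 + 1) = tri (m + 1) + (m + 1 + 1) := rfl
      exact ⟨m + 1, by omega, by omega⟩

theorem lt_tri_self : ∀ (k : Nat), 2 ≤ k → k < tri k := by
  intro k
  induction k with
  | zero => omega
  | succ k ih =>
    intro h
    have hk1 : tri (k + 1) = tri k + (k + 1) := rfl
    rcases Nat.lt_or_ge k 2 with hk | hk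
    · interval_cases k
      · omega
      · decide
    · have := ih hk; omega

-- ===== VERDICT (by name: the statement is the Claim_ definition above) =====
theorem Calc_spec : Claim_equal_Calc := by
  intro n _ hpre
  unfold Spec_Calc Calc Calc_alt
  have hn0 : 0 ≤ n := by unfold Pre_Calc at hpre; omega
  set j := n.toNat with hj
  have hnj : n = (j : Int) := by omega
  obtain ⟨m, hm1, hm2⟩ := exists_block j
  have hjlt : j < tri j := lt_tri_self j (by unfold Pre_Calc at hpre; omega)
  -- A's side
  rw [hnj, outer_fold j (0, #[])]
  simp only [List.nil_append]
  rw [PySem.List.pyGet?_natCast]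
  rw [← List.getD_eq_getElem?_getD]
  rw [getD_seqL j m j hm1 hm2 hjlt]
  -- B's side
  have h1 : ((tri 1 : Nat) : Int) = 1 := by simp [tri]
  have hs := loop_spec ((j : Nat) : Int) m (((j : Nat) : Int)).toNat 0
    (by simpa using (Nat.cast_le (α := Int)).mpr hm1)
    (by simpa using (Nat.cast_lt (α := Int)).mpr hm2)
    (by rw [h1]; omega)
  rw [h1, Int.toNat_natCast] at hs
  rw [hs]
  simp
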